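-- pv_equiv track=rewrite | github.com/t0k0shi/AtcoderABC | abc372/b/main.py | find_N_and_A
-- ===== SOURCE A (Python) =====
-- def find_N_and_A(M):
--     powers = [3**i for i in range(11)]  # 3^0 to 3^10
--     A = []
--     while M > 0:
--         # Find the largest power of 3 less than or equal to M
--         for k in range(10, -1, -1):
--             if powers[k] <= M:
--                 A.append(k)
--                 M -= powers[k]
--                 break
--     # If the number of terms exceeds 20, adjust by breaking down larger exponents
--     while len(A) > 20:
--         # Replace the largest exponent with two smaller exponents
--         largest = A.pop()
--         if largest == 0:
--             # Can't break down 3^0 further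
--             A.append(0)
--             break
--         A.extend([largest - 1, largest - 1])
--     N = len(A)
--     return N, A
-- ===== SOURCE B (Python) =====
-- def find_N_and_A(M):
--     A = []
--     if M > 0:
--         # base-3 digit expansion with the top count capped at exponent 10
--         q, r = divmod(M, 3 ** 10)
--         A = [10] * q
--         for k in range(9, -1, -1):
--             A += [k] * ((r // 3 ** k) % 3)
--     while len(A) > 20:
--         largest = A.pop()
--         if largest == 0:
--             A.append(0)
--             break
--         A.extend([largest - 1, largest - 1])
--     N = len(A)
--     return N, A
-- ===== Notes on version B (the rewrite author's own statement) =====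
-- stated objective: faster
-- what changed: The greedy repeated-subtraction loop with its inner largest-power scan is replaced by a closed-form capped base-3 digit expansion (M divmod 3^10 plus one pass over the ten digit positions); the length-adjustment loop is kept as is.
import Mathlib
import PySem

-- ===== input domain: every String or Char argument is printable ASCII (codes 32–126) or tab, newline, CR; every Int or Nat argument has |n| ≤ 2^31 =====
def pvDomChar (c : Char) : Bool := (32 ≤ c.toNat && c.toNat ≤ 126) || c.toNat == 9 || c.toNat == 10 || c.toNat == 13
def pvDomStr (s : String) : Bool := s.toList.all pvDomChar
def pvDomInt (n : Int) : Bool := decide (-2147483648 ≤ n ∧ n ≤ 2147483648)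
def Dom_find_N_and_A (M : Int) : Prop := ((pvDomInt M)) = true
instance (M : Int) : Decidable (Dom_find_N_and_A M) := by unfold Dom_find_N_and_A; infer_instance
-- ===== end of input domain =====

-- B replaces A's greedy repeated-subtraction phase by a capped base-3 digit expansion
-- (M divmod 3^10, then one pass over the ten lower digit positions); the length-adjustment
-- loop and the return are unchanged.  Objective: faster (constant-factor: no per-unit loop).

-- ===== PORT A =====
-- the exponents 10,9,…,0 scanned by the inner `for k in range(10, -1, -1)`;
-- `powers[k]` of the Python is literally 3^k, written (3:Int)^k here.
def pvDesc : List Nat := [10, 9, 8, 7, 6, 5, 4, 3, 2, 1, 0]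

-- inner for-loop: first k (scanning 10,…,0) with 3^k ≤ M; none = no break (unreachable for 0 < M)
def findK : List Nat → Int → Option Nat
  | [], _ => none
  | k :: ks, M => if (3:Int)^k ≤ M then some k else findK ks M

-- the `while M > 0` loop of A; fuel M.toNat bounds the iteration count (each step subtracts ≥ 1)
def greedyAF : Nat → Int → List Int
  | 0, _ => []
  | fuel + 1, M =>
    if 0 < M then
      match findK pvDesc M with
      | some k => (k : Int) :: greedyAF fuel (M - (3:Int)^k)
      | none => []   -- unreachable: 3^0 = 1 ≤ M when 0 < M
    else []

-- the `while len(A) > 20` adjustment loop, identical in both Pythons; fuel (last element + 1)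
-- bounds the iterations: the popped value drops by 1 each round until it reaches 0
def adjF : Nat → List Int → List Int
  | 0, A => A
  | fuel + 1, A =>
    if 20 < A.length then
      match A.getLast? with
      | none => A   -- unreachable: length > 20
      | some e =>
        if e = 0 then A.dropLast ++ [(0:Int)]           -- put 3^0 back and break
        else adjF fuel (A.dropLast ++ [e - 1, e - 1])   -- pop, extend with two copies
    else A

-- shared tail of both Pythons: run the adjustment loop, return (len(A), A)
def adjWrap (A : List Int) : Int × List Int :=
  let A2 := adjF ((A.getLastD 0).toNat + 1) A
  ((A2.length : Int), A2)

def find_N_and_A (M : Int) : Int × List Int :=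
  adjWrap (greedyAF M.toNat M)

-- ===== PORT B =====
-- A = [10] * (M // 3**10); for k in range(9, -1, -1): A += [k] * ((M % 3**10 // 3**k) % 3)
def find_N_and_A_alt (M : Int) : Int × List Int :=
  adjWrap (if 0 < M then
      (PySem.List.pyRange 9 (-1) (-1)).foldl
        (fun acc k =>
          acc ++ List.replicate
            ((PySem.Int.mod (PySem.Int.floordiv (PySem.Int.mod M ((3:Int)^10)) ((3:Int)^k.toNat)) 3).toNat) k)
        (List.replicate ((PySem.Int.floordiv M ((3:Int)^10)).toNat) 10)
    else [])

-- ===== PRECONDITION & SPEC =====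
def Spec_find_N_and_A (M : Int) (out : Int × List Int) : Prop := out = find_N_and_A_alt M
instance (M : Int) (out : Int × List Int) : Decidable (Spec_find_N_and_A M out) := by unfold Spec_find_N_and_A; infer_instance

-- ===== CLAIM (what is proved, stated in full; the proofs are below) =====
def Claim_equal_find_N_and_A : Prop := ∀ (M : Int), Dom_find_N_and_A M → Spec_find_N_and_A M (find_N_and_A M)

-- ===== LEMMAS AND PROOFS =====

-- canonical form of the digit lists (positions j,…,0), used only by the proofs
def expDigits : Nat → Int → List Int
  | 0, r => List.replicate ((r % 3).toNat) ((0 : Nat) : Int)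
  | j + 1, r => List.replicate (((r / (3:Int)^(j+1)) % 3).toNat) ((j + 1 : Nat) : Int) ++ expDigits j r

def descList : Nat → List Nat
  | 0 => [0]
  | j + 1 => (j + 1) :: descList j

lemma exp_zero (j : Nat) : expDigits j 0 = [] := by
  induction j with
  | zero => simp [expDigits]
  | succ j ih => simp [expDigits, ih]

lemma digit_depends_on_mod (j : Nat) (a : Int) :
    (a / (3:Int)^(j+1)) % 3 = ((a % (3:Int)^(j+2)) / (3:Int)^(j+1)) % 3 := by
  have hne : ((3:Int)^(j+1)) ≠ 0 := pow_ne_zero _ (by norm_num)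
  have ha : a = (a % 3^(j+2)) + (3 * (a / 3^(j+2))) * 3^(j+1) := by
    calc a = (3:Int)^(j+2) * (a / 3^(j+2)) + a % 3^(j+2) := (Int.mul_ediv_add_emod a _).symm
    _ = (a % 3^(j+2)) + (3 * (a / 3^(j+2))) * 3^(j+1) := by ring
  conv_lhs => rw [ha]
  rw [Int.add_mul_ediv_right _ _ hne]
  rw [show (a % 3^(j+2)) / 3^(j+1) + 3 * (a / 3^(j+2))
        = (a % 3^(j+2)) / 3^(j+1) + (a / 3^(j+2)) * 3 by ring]
  exact Int.add_mul_emod_self_right _ _ _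

lemma exp_congr (j : Nat) (r s : Int) (h : r % (3:Int)^(j+1) = s % (3:Int)^(j+1)) :
    expDigits j r = expDigits j s := by
  induction j generalizing r s with
  | zero =>
    simp only [expDigits]
    norm_num at h
    rw [h]
  | succ j ih =>
    have hdvd : ((3:Int)^(j+1)) ∣ ((3:Int)^(j+2)) := pow_dvd_pow _ (by omega)
    have h' : r % (3:Int)^(j+2) = s % (3:Int)^(j+2) := h
    have hlow : r % (3:Int)^(j+1) = s % (3:Int)^(j+1) := by
      rw [← Int.emod_emod_of_dvd r hdvd, ← Int.emod_emod_of_dvd s hdvd, h']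
    have hd : (r / (3:Int)^(j+1)) % 3 = (s / (3:Int)^(j+1)) % 3 := by
      rw [digit_depends_on_mod j r, digit_depends_on_mod j s, h']
    simp only [expDigits, hd, ih r s hlow]

lemma exp_step : ∀ (j k : Nat), k ≤ j → ∀ (r : Int), (3:Int)^k ≤ r → r < (3:Int)^(k+1) →
    expDigits j r = (k : Int) :: expDigits j (r - (3:Int)^k) := by
  intro j
  induction j with
  | zero =>
    intro k hk r h1 h2
    have hk0 : k = 0 := Nat.le_zero.mp hk
    subst hk0
    norm_num at h1 h2 ⊢
    simp only [expDigits]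
    rw [show r % 3 = r by omega, show (r - 1) % 3 = r - 1 by omega,
        show r.toNat = (r - 1).toNat + 1 by omega, List.replicate_succ]
    norm_num
  | succ j ih =>
    intro k hk r h1 h2
    rcases Nat.lt_or_ge k (j+1) with hlt | hge
    · -- k ≤ j : the digit at position j+1 is 0 on both sides
      have hk' : k ≤ j := by omega
      have hp1 : (3:Int)^(k+1) ≤ 3^(j+1) := pow_le_pow_right₀ (by norm_num) (by omega)
      have hpos : (0:Int) < 3^k := pow_pos (by norm_num) k
      have hd1 : r / (3:Int)^(j+1) = 0 := Int.ediv_eq_zero_of_lt (by linarith) (by linarith)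
      have hd2 : (r - (3:Int)^k) / (3:Int)^(j+1) = 0 :=
        Int.ediv_eq_zero_of_lt (by linarith) (by linarith)
      simp only [expDigits, hd1, hd2]
      simp [ih k hk' r h1 h2]
    · -- k = j+1 : the digit at position j+1 drops by one, lower digits are unchanged
      have hkj : k = j + 1 := by omega
      subst hkj
      have hpos : (0:Int) < 3^(j+1) := pow_pos (by norm_num) _
      have hne : ((3:Int)^(j+1)) ≠ 0 := ne_of_gt hpos
      have hq1 : 1 ≤ r / (3:Int)^(j+1) :=
        (Int.le_ediv_iff_mul_le hpos).mpr (by linarith)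
      have hq3 : r / (3:Int)^(j+1) < 3 := by
        refine (Int.ediv_lt_iff_lt_mul hpos).mpr ?_
        have : (3:Int)^(j+1+1) = 3 * 3^(j+1) := by ring
        linarith [h2, this.symm.trans_le (le_refl _)]
      have hqd : (r - (3:Int)^(j+1)) / (3:Int)^(j+1) = r / 3^(j+1) - 1 := by
        rw [show r - (3:Int)^(j+1) = r + (-1) * 3^(j+1) by ring, Int.add_mul_ediv_right _ _ hne]; ring
      have hlowcong : expDigits j r = expDigits j (r - 3^(j+1)) := by
        refine exp_congr j r _ ?_
        rw [show r - (3:Int)^(j+1) = r + (-1) * 3^(j+1) by ring, Int.add_mul_emod_self_right]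
      simp only [expDigits, hqd]
      rw [show (r / (3:Int)^(j+1)) % 3 = r / 3^(j+1) by omega,
          show (r / (3:Int)^(j+1) - 1) % 3 = r / 3^(j+1) - 1 by omega,
          show (r / (3:Int)^(j+1)).toNat = (r / 3^(j+1) - 1).toNat + 1 by omega,
          List.replicate_succ, ← hlowcong, List.cons_append]

-- findK on a descending exponent list finds the largest power of 3 not exceeding M
lemma findK_spec (j : Nat) (M : Int) (h1 : 0 < M) :
    M < (3:Int)^(j+1) →
    ∃ k, findK (descList j) M = some k ∧ k ≤ j ∧ (3:Int)^k ≤ M ∧ M < (3:Int)^(k+1) := by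
  induction j with
  | zero =>
    intro h2
    have h3 : (1:Int) ≤ M := by omega
    exact ⟨0, by simp [descList, findK, h3], le_refl 0, by norm_num; omega, h2⟩
  | succ j ih =>
    intro h2
    by_cases h : (3:Int)^(j+1) ≤ M
    · exact ⟨j+1, by simp [descList, findK, h], le_refl _, h, h2⟩
    · obtain ⟨k, hf, hk, hb1, hb2⟩ := ih (not_le.mp h)
      exact ⟨k, by simp [descList, findK, h, hf], by omega, hb1, hb2⟩

lemma greedy_eq : ∀ (fuel : Nat) (M : Int), M.toNat ≤ fuel →
    greedyAF fuel M
      = (if 0 < M then List.replicate ((M / 59049).toNat) 10 ++ expDigits 9 (M % 59049) else []) := by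
  intro fuel
  induction fuel with
  | zero =>
    intro M hf
    have h : ¬ 0 < M := by omega
    simp [greedyAF, h]
  | succ fuel ih =>
    intro M hf
    by_cases hM : 0 < M
    · by_cases hP : (3:Int)^10 ≤ M
      · -- top case: exponent 10 chosen
        have hP' : (59049:Int) ≤ M := by norm_num at hP; exact hP
        have hfind : findK pvDesc M = some 10 := by simp [pvDesc, findK, hP']
        rw [show greedyAF (fuel+1) M = (10:Int) :: greedyAF fuel (M - 3^10) from by
              simp [greedyAF, hM, hfind]]
        rw [ih (M - 3^10) (by norm_num; omega), show (3:Int)^10 = 59049 from by norm_num]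
        by_cases h0 : 0 < M - 59049
        · rw [if_pos h0, if_pos hM,
              show (M - 59049) / 59049 = M / 59049 - 1 by omega,
              show (M - 59049) % 59049 = M % 59049 by omega,
              show (M / 59049).toNat = (M / 59049 - 1).toNat + 1 by omega,
              List.replicate_succ, List.cons_append]
        · have hMe : M = 59049 := by omega
          subst hMe
          rw [if_neg h0, if_pos hM]
          norm_num [exp_zero]
      · -- 0 < M < 3^10 : a lower exponent is chosen
        have hflt : M < (3:Int)^(9+1) := not_le.mp hP
        obtain ⟨k, hf9, hk9, hb1, hb2⟩ := findK_spec 9 M hM hflt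
        have hfind : findK pvDesc M = some k := by
          rw [show pvDesc = 10 :: descList 9 from by decide]
          simp only [findK, if_neg hP]
          exact hf9
        rw [show greedyAF (fuel+1) M = (k:Int) :: greedyAF fuel (M - 3^k) from by
              simp [greedyAF, hM, hfind]]
        have hx1 : (1:Int) ≤ 3^k := one_le_pow₀ (by norm_num)
        have hk1 : (3:Int)^(k+1) ≤ 59049 := by
          calc (3:Int)^(k+1) ≤ 3^10 := pow_le_pow_right₀ (by norm_num) (by omega)
          _ = 59049 := by norm_num
        rw [ih (M - 3^k) (by omega), if_pos hM,
            show M / 59049 = 0 by omega, show M % 59049 = M by omega]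
        simp only [Int.toNat_zero, List.replicate_zero, List.nil_append]
        rw [exp_step 9 k hk9 M hb1 hb2]
        by_cases h0 : 0 < M - 3^k
        · rw [if_pos h0, show (M - 3^k) / 59049 = 0 by omega,
              show (M - 3^k) % 59049 = M - 3^k by omega]
          simp
        · rw [if_neg h0, show M - (3:Int)^k = 0 by omega, exp_zero]
    · simp [greedyAF, hM]

-- the B-side fold is the canonical digit list appended to its initial accumulator
lemma bfold (init : List Int) (r : Int) :
    (PySem.List.pyRange 9 (-1) (-1)).foldl
      (fun acc k =>
        acc ++ List.replicate ((PySem.Int.mod (PySem.Int.floordiv r ((3:Int)^k.toNat)) 3).toNat) k) init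
    = init ++ expDigits 9 r := by
  have hl : PySem.List.pyRange 9 (-1) (-1) = [9,8,7,6,5,4,3,2,1,0] := by decide
  have hfd : ∀ (a : Int) (n : Nat), PySem.Int.floordiv a ((3:Int)^n) = a / 3^n :=
    fun a n => PySem.Int.floordiv_eq_ediv_of_pos (pow_pos (by norm_num) n)
  have hmd : ∀ (a : Int), PySem.Int.mod a 3 = a % 3 := fun a => PySem.Int.mod_eq_emod_of_pos (by norm_num)
  rw [hl]
  simp only [List.foldl_cons, List.foldl_nil, hfd, hmd,
    show ((9:Int).toNat)=9 from rfl, show ((8:Int).toNat)=8 from rfl, show ((7:Int).toNat)=7 from rfl,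
    show ((6:Int).toNat)=6 from rfl, show ((5:Int).toNat)=5 from rfl, show ((4:Int).toNat)=4 from rfl,
    show ((3:Int).toNat)=3 from rfl, show ((2:Int).toNat)=2 from rfl, show ((1:Int).toNat)=1 from rfl,
    show ((0:Int).toNat)=0 from rfl]
  simp only [expDigits]
  norm_num [List.append_assoc]

-- ===== VERDICT (by name: the statement is the Claim_ definition above) =====
theorem find_N_and_A_spec : Claim_equal_find_N_and_A := by
  intro M _
  unfold Spec_find_N_and_A find_N_and_A find_N_and_A_alt
  congr 1
  rw [greedy_eq M.toNat M le_rfl]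
  by_cases hM : 0 < M
  · rw [if_pos hM, if_pos hM, bfold]
    have hfd : PySem.Int.floordiv M ((3:Int)^10) = M / 59049 := by
      rw [show (3:Int)^10 = 59049 from by norm_num]
      exact PySem.Int.floordiv_eq_ediv_of_pos (by norm_num)
    have hmd : PySem.Int.mod M ((3:Int)^10) = M % 59049 := by
      rw [show (3:Int)^10 = 59049 from by norm_num]
      exact PySem.Int.mod_eq_emod_of_pos (by norm_num)
    rw [hfd, hmd]
  · rw [if_neg hM, if_neg hM]
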